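-- pv_equiv track=rewrite | github.com/keshavsingh4522/hacktoberfest | DSA/Project Euler Problems/Problem46.py | check_conjucature
-- ===== SOURCE A (Python) =====
-- import math
--
-- def check_prime(num):
--     if num == 1 :
--         return False
--     elif num == 2:
--         return True
--     else:
--         for i in range(2,int(math.sqrt(num) + 1)):
--             if num%i == 0:
--                 return False
--         return True
--
-- def check_conjucature(num):
--     for i in range(1,num):
--         if check_prime(i):
--             temp = num - i
--             for j in range(1,temp):
--                 if 2*j*j == temp:
--                     return True
--     return False
-- ===== SOURCE B (Python) =====
-- import math
--
-- def is_prime(n):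
--     if n < 2:
--         return False
--     return all(n % d != 0 for d in range(2, math.isqrt(n) + 1))
--
-- def check_conjucature(num):
--     if num < 2:
--         return False
--     limit = math.isqrt((num - 1) // 2)
--     return any(is_prime(num - 2 * j * j) for j in range(1, limit + 1))
-- ===== Notes on version B (the rewrite author's own statement) =====
-- stated objective: faster
-- what changed: B inverts the search: instead of scanning every i < num and linearly searching for j with 2*j*j == num-i, it enumerates j up to isqrt((num-1)//2) and trial-divides num-2*j*j for primality, removing both linear scans.
import Mathlib
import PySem

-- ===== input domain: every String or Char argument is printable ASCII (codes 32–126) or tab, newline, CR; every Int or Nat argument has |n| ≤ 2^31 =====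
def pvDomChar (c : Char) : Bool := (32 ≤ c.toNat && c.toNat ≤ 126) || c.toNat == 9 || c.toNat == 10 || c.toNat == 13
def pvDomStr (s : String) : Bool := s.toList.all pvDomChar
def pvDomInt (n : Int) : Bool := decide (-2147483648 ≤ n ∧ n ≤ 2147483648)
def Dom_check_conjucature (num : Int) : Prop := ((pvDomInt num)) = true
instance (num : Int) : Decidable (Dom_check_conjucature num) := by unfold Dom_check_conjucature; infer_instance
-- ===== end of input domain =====

-- B enumerates j with 2*j*j ≤ num-1 and primality-tests num-2*j*j, replacing A's double linear scan (faster).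


-- ===== PORT A =====
-- int(math.sqrt(num) + 1) is ported by hand as Nat.sqrt num.toNat + 1: exact for 1 ≤ num ≤ 2^31
-- (the double-precision sqrt error there is far smaller than the distance to the next integer).
def check_prime (num : Int) : Bool :=
  if num == 1 then false
  else if num == 2 then true
  else
    if (PySem.List.pyRange 2 ((Nat.sqrt num.toNat : Int) + 1) 1).any
        (fun i => PySem.Int.mod num i == 0)
    then false
    else true

def check_conjucature (num : Int) : Bool :=
  (PySem.List.pyRange 1 num 1).any (fun i =>
    check_prime i &&
      (let temp := num - i
       (PySem.List.pyRange 1 temp 1).any (fun j => 2 * j * j == temp)))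

-- ===== PORT B =====
-- math.isqrt(n) is ported as Nat.sqrt n.toNat (exact on the nonnegative arguments B passes).
def is_prime (n : Int) : Bool :=
  if n < 2 then false
  else (PySem.List.pyRange 2 ((Nat.sqrt n.toNat : Int) + 1) 1).all
        (fun d => !(PySem.Int.mod n d == 0))

def check_conjucature_alt (num : Int) : Bool :=
  if num < 2 then false
  else
    let limit : Int := (Nat.sqrt (PySem.Int.floordiv (num - 1) 2).toNat : Int)
    (PySem.List.pyRange 1 (limit + 1) 1).any (fun j => is_prime (num - 2 * j * j))

-- ===== PRECONDITION & SPEC =====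
def Spec_check_conjucature (num : Int) (out : Bool) : Prop := out = check_conjucature_alt num
instance (num : Int) (out : Bool) : Decidable (Spec_check_conjucature num out) := by unfold Spec_check_conjucature; infer_instance

-- ===== CLAIM (what is proved, stated in full; the proofs are below) =====
def Claim_equal_check_conjucature : Prop := ∀ (num : Int), Dom_check_conjucature num → Spec_check_conjucature num (check_conjucature num)

-- ===== LEMMAS AND PROOFS =====

-- check_prime and is_prime agree on every argument either program passes (n ≥ 1).
theorem prime_agree (n : Int) (hn : 1 ≤ n) : check_prime n = is_prime n := by
  by_cases h1 : n = 1
  · subst h1; simp [check_prime, is_prime]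
  by_cases h2 : n = 2
  · subst h2
    have hs : Nat.sqrt 2 = 1 := by
      have hu : Nat.sqrt 2 < 2 := Nat.sqrt_lt'.mpr (by norm_num)
      have hl : 1 ≤ Nat.sqrt 2 := Nat.le_sqrt'.mpr (by norm_num)
      omega
    simp [check_prime, is_prime, hs, PySem.List.pyRange_one_eq_nil]
  have h3 : ¬ n < 2 := by omega
  simp only [check_prime, is_prime]
  rw [if_neg (by simpa using h1), if_neg (by simpa using h2), if_neg h3,
    ← List.not_any_eq_all_not]
  cases (PySem.List.pyRange 2 ((Nat.sqrt n.toNat : Int) + 1) 1).any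
      (fun i => PySem.Int.mod n i == 0) <;> simp

theorem half_le (A num : Int) (h : 2 * A ≤ num - 1) : A ≤ (num - 1) / 2 := by omega
theorem le_half (A num : Int) (h : A ≤ (num - 1) / 2) : 2 * A ≤ num - 1 := by omega

-- j ≤ isqrt((num-1)//2)  ↔  2*j*j ≤ num-1   (for 2 ≤ num, 1 ≤ j)
theorem limit_iff (num j : Int) (hn : 2 ≤ num) (hj : 1 ≤ j) :
    j < (Nat.sqrt (PySem.Int.floordiv (num - 1) 2).toNat : Int) + 1 ↔ 2 * j * j ≤ num - 1 := by
  rw [PySem.Int.floordiv_eq_ediv_of_pos (by norm_num : (0:Int) < 2)]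
  have h0 : (0:Int) ≤ (num - 1) / 2 := by omega
  have hj0 : (0:Int) ≤ j := by omega
  rw [Int.lt_add_one_iff, ← Int.toNat_le, Nat.le_sqrt']
  constructor
  · intro h
    have h' : ((j.toNat ^ 2 : Nat) : Int) ≤ ((((num - 1) / 2).toNat : Nat) : Int) := by
      exact_mod_cast h
    rw [Int.toNat_of_nonneg h0] at h'
    push_cast [Int.toNat_of_nonneg hj0] at h'
    have hjj : j * j ≤ (num - 1) / 2 := by nlinarith [h']
    have := le_half (j * j) num hjj
    linarith
  · intro h
    have hjj : j * j ≤ (num - 1) / 2 := half_le (j * j) num (by linarith)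
    have h' : ((j.toNat : Int)) ^ 2 ≤ ((((num - 1) / 2).toNat : Nat) : Int) := by
      rw [Int.toNat_of_nonneg h0, Int.toNat_of_nonneg hj0]; nlinarith [hjj]
    exact_mod_cast h'

theorem equal_iff (num : Int) :
    check_conjucature num = true ↔ check_conjucature_alt num = true := by
  unfold check_conjucature check_conjucature_alt
  by_cases h2 : num < 2
  · rw [if_pos h2]
    simp only [List.any_eq_true, PySem.List.mem_pyRange_one]
    constructor
    · rintro ⟨i, ⟨hi1, hi2⟩, -⟩; omega
    · intro h; exact (Bool.false_ne_true h).elim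
  · rw [if_neg h2]
    have hn : 2 ≤ num := by omega
    simp only [List.any_eq_true, PySem.List.mem_pyRange_one, Bool.and_eq_true, beq_iff_eq]
    constructor
    · rintro ⟨i, ⟨hi1, hi2⟩, hp, j, ⟨hj1, hj2⟩, he⟩
      refine ⟨j, ⟨hj1, (limit_iff num j hn hj1).mpr (by linarith)⟩, ?_⟩
      have hi : num - 2 * j * j = i := by linarith
      rw [hi, ← prime_agree i hi1]
      exact hp
    · rintro ⟨j, ⟨hj1, hj2⟩, hp⟩
      have hb : 2 * j * j ≤ num - 1 := (limit_iff num j hn hj1).mp hj2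
      have hjlt : j < 2 * j * j := by nlinarith [sq_nonneg (j - 1)]
      refine ⟨num - 2 * j * j, ⟨by linarith, by linarith⟩, ?_, j, ⟨hj1, by linarith⟩, by ring⟩
      rw [prime_agree (num - 2 * j * j) (by linarith)]
      exact hp

-- ===== VERDICT (by name: the statement is the Claim_ definition above) =====
theorem check_conjucature_spec : Claim_equal_check_conjucature := by
  intro num _
  unfold Spec_check_conjucature
  have h := equal_iff num
  cases hA : check_conjucature num <;> cases hB : check_conjucature_alt num <;> simp_all
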